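-- pv_equiv track=rewrite | github.com/Pranavi2002/CodePath-TP-102-Course | Unit-3/s2v2p5.py | count_explorers
-- ===== SOURCE A (Python) =====
-- from collections import deque
--
-- def count_explorers(explorers, supplies):
--     queue = deque(explorers)
--     stack = supplies
--     i = 0  # pointer for the top of the supply stack
--
--     # We'll keep track of how many explorers have been rotated without any supply taken
--     # If this equals the queue length, it means no one wants the current supply
--     rotations = 0
--
--     while queue and i < len(stack):
--         if queue[0] == stack[i]:
--             queue.popleft()   # explorer takes the supply and leaves
--             i += 1            # move to the next supply
--             rotations = 0     # reset rotations since a supply was taken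
--         else:
--             queue.append(queue.popleft())  # move explorer to the back
--             rotations += 1
--
--             # If all remaining explorers have been rotated once without success, stop
--             if rotations == len(queue):
--                 break
--
--     return len(queue)
-- ===== SOURCE B (Python) =====
-- def count_explorers(explorers, supplies):
--     counts = {}
--     for e in explorers:
--         counts[e] = counts.get(e, 0) + 1
--     remaining = len(explorers)
--     for s in supplies:
--         if counts.get(s, 0) == 0:
--             break
--         counts[s] = counts[s] - 1
--         remaining -= 1
--     return remaining
-- ===== Notes on version B (the rewrite author's own statement) =====
-- stated objective: alternative
-- what changed: Replaces the queue-rotation simulation (repeatedly cycling explorers past each supply) with a single-pass preference counter: count each explorer's wanted value in a dict, then scan the supply stack decrementing counts and stop at the first supply nobody wants.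
import Mathlib
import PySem

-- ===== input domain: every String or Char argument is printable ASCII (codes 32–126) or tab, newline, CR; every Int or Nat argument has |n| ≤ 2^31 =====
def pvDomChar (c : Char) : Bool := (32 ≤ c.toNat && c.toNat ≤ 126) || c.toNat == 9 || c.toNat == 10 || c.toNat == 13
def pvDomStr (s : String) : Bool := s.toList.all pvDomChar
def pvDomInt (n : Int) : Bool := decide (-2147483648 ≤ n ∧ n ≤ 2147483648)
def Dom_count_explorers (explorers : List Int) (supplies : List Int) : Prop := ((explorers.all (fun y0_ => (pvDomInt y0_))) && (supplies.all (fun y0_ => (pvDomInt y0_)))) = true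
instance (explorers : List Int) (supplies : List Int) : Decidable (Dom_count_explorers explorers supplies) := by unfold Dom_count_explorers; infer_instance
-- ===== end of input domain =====

-- B replaces A's queue-rotation simulation by a counter scan over the supplies (alternative algorithm; not measured faster on the generated inputs).

-- ===== PORT A =====
-- A's while-loop: queue is the deque, i the stack pointer, r the rotation count.
-- The fuel argument only makes the recursion total; (|explorers|+1)*(|supplies|+1)
-- strictly bounds the number of loop iterations, so fuel is never exhausted from
-- the top-level call (proved in loopA_g below).
def loopA (stack : List Int) : Nat → List Int → Nat → Nat → Int
  | 0, q, _, _ => (q.length : Int)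
  | fuel+1, q, i, r =>
    match q, stack[i]? with
    | x :: t, some s =>
        if x = s then loopA stack fuel t (i+1) 0            -- supply taken
        else
          if r + 1 = (t ++ [x]).length then ((t ++ [x]).length : Int)  -- full rotation: break
          else loopA stack fuel (t ++ [x]) i (r+1)          -- rotate explorer to the back
    | _, _ => (q.length : Int)                              -- while-guard fails

def count_explorers (explorers : List Int) (supplies : List Int) : Int :=
  loopA supplies ((explorers.length + 1) * (supplies.length + 1)) explorers 0 0

-- ===== PORT B =====
-- B's supply scan; `counts[s] - 1` is ported as `d.getD s 0 - 1`, exact here because the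
-- branch is guarded by `counts.get(s, 0) != 0`, so the key is present.
def altLoop : PySem.Dict Int Int → Int → List Int → Int
  | _, rem, [] => rem
  | d, rem, s :: rest =>
    if d.getD s 0 = 0 then rem
    else altLoop (d.insert s (d.getD s 0 - 1)) (rem - 1) rest

def count_explorers_alt (explorers : List Int) (supplies : List Int) : Int :=
  let counts := explorers.foldl (fun d e => d.insert e (d.getD e 0 + 1)) PySem.Dict.empty
  altLoop counts (explorers.length : Int) supplies

-- ===== PRECONDITION & SPEC =====
def Spec_count_explorers (explorers : List Int) (supplies : List Int) (out : Int) : Prop := out = count_explorers_alt explorers supplies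
instance (explorers : List Int) (supplies : List Int) (out : Int) : Decidable (Spec_count_explorers explorers supplies out) := by unfold Spec_count_explorers; infer_instance

-- ===== CLAIM (what is proved, stated in full; the proofs are below) =====
def Claim_equal_count_explorers : Prop := ∀ (explorers : List Int) (supplies : List Int), Dom_count_explorers explorers supplies → Spec_count_explorers explorers supplies (count_explorers explorers supplies)

-- ===== LEMMAS AND PROOFS =====

-- Common abstract description: greedily serve supplies while some remaining explorer wants them.
def gSpec : List Int → List Int → Int
  | q, [] => (q.length : Int)
  | q, s :: rest => if q.count s = 0 then (q.length : Int) else gSpec (q.erase s) rest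

theorem gSpec_perm : ∀ (rest q q' : List Int), q.Perm q' → gSpec q rest = gSpec q' rest := by
  intro rest
  induction rest with
  | nil => intro q q' h; simp [gSpec, h.length_eq]
  | cons s rest ih =>
    intro q q' h
    simp only [gSpec, h.count_eq, h.length_eq]
    split_ifs with hz
    · rfl
    · exact ih _ _ (h.erase s)

-- B's loop computes gSpec as long as the dict carries the counts of q.
theorem altLoop_eq_gSpec : ∀ (rest q : List Int) (d : PySem.Dict Int Int),
    (∀ k, d.getD k 0 = (q.count k : Int)) → altLoop d (q.length : Int) rest = gSpec q rest := by
  intro rest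
  induction rest with
  | nil => intro q d _; simp [altLoop, gSpec]
  | cons s rest ih =>
    intro q d h
    have hs := h s
    by_cases hz : q.count s = 0
    · simp [altLoop, gSpec, hs, hz]
    · have hmem : s ∈ q := List.count_pos_iff.mp (Nat.pos_of_ne_zero hz)
      have hq1 : 1 ≤ q.length := List.length_pos_of_mem hmem
      have hlen : ((q.erase s).length : Int) = (q.length : Int) - 1 := by
        rw [List.length_erase_of_mem hmem]; omega
      have hne : d.getD s 0 ≠ 0 := by rw [hs]; exact_mod_cast hz
      have hcounts : ∀ k, (d.insert s (d.getD s 0 - 1)).getD k 0 = ((q.erase s).count k : Int) := by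
        intro k
        rw [PySem.Dict.getD_insert]
        by_cases hk : k = s
        · rw [if_pos hk, hk, List.count_erase_self, hs]
          have h1 : 1 ≤ q.count s := Nat.pos_of_ne_zero hz
          omega
        · rw [if_neg hk, h k, List.count_erase_of_ne hk]
      have := ih (q.erase s) (d.insert s (d.getD s 0 - 1)) hcounts
      simp only [altLoop, gSpec, if_neg hne, if_neg hz]
      rw [← hlen]
      exact this

theorem alt_eq_gSpec (explorers supplies : List Int) :
    count_explorers_alt explorers supplies = gSpec explorers supplies := by
  unfold count_explorers_alt
  rw [PySem.Dict.foldl_insert_getD_add_one_eq_counter]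
  exact altLoop_eq_gSpec supplies explorers _ (fun k => PySem.Dict.getD_counter explorers k)

-- A-side: step lemmas.
theorem loopA_nil (stack : List Int) (F i r : Nat) : loopA stack F [] i r = 0 := by
  cases F with
  | zero => simp [loopA]
  | succ fuel => cases stack[i]? <;> simp [loopA]

theorem loopA_out (stack q : List Int) (F i r : Nat) (h : ¬ i < stack.length) :
    loopA stack F q i r = (q.length : Int) := by
  cases F with
  | zero => simp [loopA]
  | succ fuel =>
    have hn : stack[i]? = none := by
      rw [List.getElem?_eq_none]; omega
    cases q <;> simp [loopA, hn]

theorem loopA_cons (stack : List Int) (fuel : Nat) (x : Int) (t : List Int) (i r : Nat)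
    (hi : i < stack.length) :
    loopA stack (fuel+1) (x :: t) i r =
      if x = stack[i] then loopA stack fuel t (i+1) 0
      else if r + 1 = (t ++ [x]).length then ((t ++ [x]).length : Int)
      else loopA stack fuel (t ++ [x]) i (r+1) := by
  simp [loopA, List.getElem?_eq_getElem hi]

-- Rotating an unwanted prefix a past the front of the queue.
theorem loopA_rot (stack : List Int) (i : Nat) (hi : i < stack.length) :
    ∀ (a b : List Int) (r fuel : Nat), (∀ x ∈ a, x ≠ stack[i]) → r < b.length →
    loopA stack (fuel + a.length) (a ++ b) i r = loopA stack fuel (b ++ a) i (r + a.length) := by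
  intro a
  induction a with
  | nil => intro b r fuel _ _; simp
  | cons x a' ih =>
    intro b r fuel hall hr
    have hx : x ≠ stack[i] := hall x (List.mem_cons_self)
    have hstep := loopA_cons stack (fuel + a'.length) x (a' ++ b) i r hi
    have hlenne : r + 1 ≠ ((a' ++ b) ++ [x]).length := by
      simp only [List.length_append, List.length_cons, List.length_nil]
      omega
    have hcast : (x :: a' : List Int).length + fuel = (fuel + a'.length) + 1 := by
      simp [List.length_cons]; omega
    calc loopA stack (fuel + (x :: a').length) ((x :: a') ++ b) i r
        = loopA stack ((fuel + a'.length) + 1) (x :: (a' ++ b)) i r := rfl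
      _ = loopA stack (fuel + a'.length) ((a' ++ b) ++ [x]) i (r + 1) := by
          rw [hstep, if_neg hx, if_neg hlenne]
      _ = loopA stack (fuel + a'.length) (a' ++ (b ++ [x])) i (r + 1) := by
          rw [List.append_assoc]
      _ = loopA stack fuel ((b ++ [x]) ++ a') i ((r + 1) + a'.length) := by
          refine ih (b ++ [x]) (r + 1) fuel (fun y hy => hall y (List.mem_cons_of_mem _ hy)) ?_
          simp only [List.length_append, List.length_cons, List.length_nil]
          omega
      _ = loopA stack fuel (b ++ (x :: a')) i (r + (x :: a').length) := by
          rw [List.append_assoc]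
          simp only [List.singleton_append, List.length_cons]
          congr 1
          omega

-- One full unsuccessful rotation: the loop breaks, returning the queue length.
theorem loopA_break (stack : List Int) (i : Nat) (hi : i < stack.length) (q : List Int)
    (hq : q ≠ []) (hall : ∀ x ∈ q, x ≠ stack[i]) (fuel : Nat) :
    loopA stack (fuel + q.length) q i 0 = (q.length : Int) := by
  rcases (List.eq_nil_or_concat q) with h | ⟨a, y, h⟩
  · exact absurd h hq
  · rw [List.concat_eq_append] at h
    subst h
    have hy : y ≠ stack[i] := hall y (by simp)
    have ha : ∀ x ∈ a, x ≠ stack[i] := fun x hx => hall x (by simp [hx])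
    have h1 : fuel + (a ++ [y]).length = (fuel + 1) + a.length := by
      simp [List.length_append]; omega
    rw [h1, loopA_rot stack i hi a [y] 0 (fuel + 1) ha (by simp)]
    simp only [List.singleton_append, Nat.zero_add]
    rw [loopA_cons stack fuel y a i a.length hi, if_neg hy,
      if_pos (by simp [List.length_append])]

-- A successful round: rotate the unwanted prefix a, then the front explorer takes stack[i].
theorem loopA_match (stack : List Int) (i : Nat) (hi : i < stack.length) (a b : List Int)
    (fuel : Nat) (hall : ∀ x ∈ a, x ≠ stack[i]) :
    loopA stack ((fuel + 1) + a.length) (a ++ stack[i] :: b) i 0 =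
      loopA stack fuel (b ++ a) (i+1) 0 := by
  rw [loopA_rot stack i hi a (stack[i] :: b) 0 (fuel + 1) hall (by simp)]
  simp only [List.cons_append, Nat.zero_add]
  rw [loopA_cons stack fuel stack[i] (b ++ a) i a.length hi, if_pos rfl]

-- Main A-side characterisation: with enough fuel, A's loop computes gSpec.
theorem loopA_g : ∀ (n : Nat) (stack : List Int) (i : Nat) (q : List Int) (fuel : Nat),
    stack.length ≤ i + n →
    loopA stack (fuel + (q.length + 1) * n + q.length) q i 0 = gSpec q (stack.drop i) := by
  intro n
  induction n with
  | zero =>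
    intro stack i q fuel hle
    rw [List.drop_eq_nil_of_le (by omega), loopA_out stack q _ i 0 (by omega)]
    cases q <;> simp [gSpec]
  | succ n ih =>
    intro stack i q fuel hle
    by_cases hi : i < stack.length
    · have hdrop : stack.drop i = stack[i] :: stack.drop (i+1) := List.drop_eq_getElem_cons hi
      by_cases hz : q.count stack[i] = 0
      · -- nobody in the queue wants stack[i]: the loop breaks (or the queue is empty)
        have hnot : ∀ x ∈ q, x ≠ stack[i] := by
          intro x hx hxs
          exact (List.count_eq_zero.mp hz) (hxs ▸ hx)
        rcases q with _ | ⟨x, t⟩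
        · rw [hdrop, loopA_nil]
          simp [gSpec]
        · rw [loopA_break stack i hi (x :: t) (by simp) hnot _, hdrop]
          simp [gSpec, hz]
      · -- some explorer wants stack[i]: split q at the first one
        have hmem : stack[i] ∈ q := List.count_pos_iff.mp (Nat.pos_of_ne_zero hz)
        have hsplit : q.takeWhile (fun x => x != stack[i]) ++ q.dropWhile (fun x => x != stack[i]) = q :=
          List.takeWhile_append_dropWhile
        have hdw : q.dropWhile (fun x => x != stack[i]) ≠ [] := by
          intro h0
          have htw : q.takeWhile (fun x => x != stack[i]) = q := by
            conv_rhs => rw [← hsplit, h0, List.append_nil]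
          have := List.mem_takeWhile_imp (htw ▸ hmem)
          simp at this
        obtain ⟨y, b, hdw2⟩ : ∃ y b, q.dropWhile (fun x => x != stack[i]) = y :: b := by
          cases hd : q.dropWhile (fun x => x != stack[i]) with
          | nil => exact absurd hd hdw
          | cons y b => exact ⟨y, b, rfl⟩
        have hy : y = stack[i] := by
          have hh := List.head_dropWhile_not _ hdw
          simp only [hdw2, List.head_cons] at hh
          simpa using hh
        have hqeq : q = q.takeWhile (fun x => x != stack[i]) ++ stack[i] :: b := by
          conv_lhs => rw [← hsplit]
          rw [hdw2, hy]
        have hallA : ∀ x ∈ q.takeWhile (fun x => x != stack[i]), x ≠ stack[i] := by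
          intro x hx
          have := List.mem_takeWhile_imp hx
          simpa using this
        set A := q.takeWhile (fun x => x != stack[i]) with hAdef
        have harith : fuel + (q.length + 1) * (n+1) + q.length
            = (((fuel + n + b.length + 2) + ((b ++ A).length + 1) * n + (b ++ A).length) + 1) + A.length := by
          conv_lhs => rw [hqeq]
          simp only [List.length_append, List.length_cons]
          ring
        rw [harith]
        conv_lhs => rw [hqeq]
        rw [loopA_match stack i hi A b _ hallA,
          ih stack (i+1) (b ++ A) (fuel + n + b.length + 2) (by omega), hdrop]
        have herase : q.erase stack[i] = A ++ b := by
          rw [hqeq, List.erase_append_right _ (by intro hc; exact hallA _ hc rfl),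
            List.erase_cons_head]
        have hg : gSpec q (stack[i] :: stack.drop (i+1)) = gSpec (q.erase stack[i]) (stack.drop (i+1)) := by
          simp [gSpec, hz]
        rw [hg, herase, gSpec_perm (stack.drop (i+1)) (A ++ b) (b ++ A) List.perm_append_comm]
    · rw [List.drop_eq_nil_of_le (by omega), loopA_out stack q _ i 0 hi]
      cases q <;> simp [gSpec]

-- ===== VERDICT (by name: the statement is the Claim_ definition above) =====
theorem count_explorers_spec : Claim_equal_count_explorers := by
  intro explorers supplies _
  unfold Spec_count_explorers
  rw [alt_eq_gSpec]
  unfold count_explorers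
  have h : (explorers.length + 1) * (supplies.length + 1)
      = 1 + (explorers.length + 1) * supplies.length + explorers.length := by ring
  rw [h, loopA_g supplies.length supplies 0 explorers 1 (by omega)]
  simp
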